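-- pv_equiv track=rewrite | github.com/findingfoot/Python_Challenges | simple_back_add.py | SimpleAdding
-- ===== SOURCE A (Python) =====
-- def SimpleAdding(num):
--     result = 0
--     num = int(num)
--     for i in range(1, num + 1):
--         if num == 0:
--             result = 0
--         else:
--             result = result + i
--     return result
-- ===== SOURCE B (Python) =====
-- def SimpleAdding(num):
--     num = int(num)
--     return num * (num + 1) // 2 if num > 0 else 0
-- ===== Notes on version B (the rewrite author's own statement) =====
-- stated objective: faster
-- what changed: Replaces the accumulation loop over range(1, num+1) with the Gauss closed form num*(num+1)//2 (0 for num < 1).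
import Mathlib
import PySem

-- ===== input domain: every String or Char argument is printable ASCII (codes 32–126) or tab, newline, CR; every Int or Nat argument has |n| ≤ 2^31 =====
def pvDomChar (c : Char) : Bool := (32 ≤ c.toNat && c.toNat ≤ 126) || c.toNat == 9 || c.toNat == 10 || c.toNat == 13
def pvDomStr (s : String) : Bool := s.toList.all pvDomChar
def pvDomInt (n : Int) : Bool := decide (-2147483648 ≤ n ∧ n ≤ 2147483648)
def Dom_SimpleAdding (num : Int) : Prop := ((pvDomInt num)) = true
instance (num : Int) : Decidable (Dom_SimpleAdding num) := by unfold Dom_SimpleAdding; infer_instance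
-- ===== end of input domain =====

-- B replaces A's accumulation loop with the Gauss closed form num*(num+1)//2 (0 for num < 1): O(1) instead of O(n).

-- ===== PORT A =====
def SimpleAdding (num : Int) : Int :=
  (PySem.List.pyRange 1 (num + 1) 1).foldl
    (fun result i => if num == 0 then 0 else result + i) 0

-- ===== PORT B =====
def SimpleAdding_alt (num : Int) : Int :=
  if num > 0 then PySem.Int.floordiv (num * (num + 1)) 2 else 0

-- ===== PRECONDITION & SPEC =====
def Spec_SimpleAdding (num : Int) (out : Int) : Prop := out = SimpleAdding_alt num
instance (num : Int) (out : Int) : Decidable (Spec_SimpleAdding num out) := by unfold Spec_SimpleAdding; infer_instance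

-- ===== CLAIM (what is proved, stated in full; the proofs are below) =====
def Claim_equal_SimpleAdding : Prop := ∀ (num : Int), Dom_SimpleAdding num → Spec_SimpleAdding num (SimpleAdding num)

-- ===== LEMMAS AND PROOFS =====

-- the plain-sum loop over 1..n equals the Gauss value
theorem foldl_sum_pyRange (n : Nat) :
    (PySem.List.pyRange 1 ((n : Int) + 1) 1).foldl (fun r i => r + i) 0
      = (n : Int) * ((n : Int) + 1) / 2 := by
  induction n with
  | zero => simp [PySem.List.pyRange_one_eq_nil]
  | succ k ih =>
    have h : ((k : Int) + 1) + 1 = ((k + 1 : Nat) : Int) + 1 := by push_cast; ring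
    rw [← h, PySem.List.pyRange_one_succ_right (by omega)]
    rw [List.foldl_append, ih]
    simp only [List.foldl_cons, List.foldl_nil]
    have h2 : (2 : Int) ∣ (k : Int) * ((k : Int) + 1) := Int.even_mul_succ_self k |>.two_dvd
    have h3 : (2 : Int) ∣ ((k : Int) + 1) * ((k : Int) + 1 + 1) := Int.even_mul_succ_self _ |>.two_dvd
    have h4 : ((k : Int) + 1) * ((k : Int) + 1 + 1) = (k : Int) * ((k : Int) + 1) + 2 * ((k : Int) + 1) := by ring
    push_cast
    omega

-- ===== VERDICT (by name: the statement is the Claim_ definition above) =====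
theorem SimpleAdding_spec : Claim_equal_SimpleAdding := by
  intro num _
  unfold Spec_SimpleAdding SimpleAdding SimpleAdding_alt
  by_cases hpos : num > 0
  · obtain ⟨n, rfl⟩ : ∃ n : Nat, num = (n : Int) := ⟨num.toNat, by omega⟩
    have hne : ((n : Int) == 0) = false := by simp; omega
    rw [PySem.Int.floordiv_eq_ediv_of_pos (by omega)]
    simp only [hne, Bool.false_eq_true, if_false, if_pos hpos]
    exact foldl_sum_pyRange n
  · rw [PySem.List.pyRange_one_eq_nil (by omega)]
    simp [hpos]
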